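-- pv_equiv track=rewrite | github.com/anoojpatel/squidbillie | src/squidbilli/synth.py | parse_pattern
-- ===== SOURCE A (Python) =====
-- def _note_to_midi(note: str) -> int | None:
--     s = str(note or "").strip().upper()
--     if not s:
--         return None
--     if s in ("~", "REST", "R"):
--         return None
--
--     names = {"C": 0, "C#": 1, "DB": 1, "D": 2, "D#": 3, "EB": 3, "E": 4, "F": 5, "F#": 6, "GB": 6, "G": 7, "G#": 8, "AB": 8, "A": 9, "A#": 10, "BB": 10, "B": 11}
--
--     if len(s) < 2:
--         return None
--
--     letter = s[0]
--     accidental = ""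
--     rest = s[1:]
--     if rest and rest[0] in ("#", "B"):
--         accidental = rest[0]
--         rest = rest[1:]
--
--     key = letter + accidental
--     if key not in names:
--         return None
--
--     try:
--         octave = int(rest)
--     except Exception:
--         return None
--
--     # MIDI: C4 = 60
--     return int((octave + 1) * 12 + names[key])
--
-- def parse_pattern(pattern: str) -> list[int | None]:
--     s = str(pattern or "").strip()
--     if not s:
--         return []
--     out: list[int | None] = []
--     for tok in s.split():
--         m = _note_to_midi(tok)
--         out.append(m)
--     return out
-- ===== SOURCE B (Python) =====
-- def _midi(tok):
--     s = tok.strip().upper()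
--     if len(s) < 2 or s[0] not in "ABCDEFG":
--         return None
--     # pitch class of the natural letter, computed arithmetically instead of a table:
--     # diatonic index from C, then the whole/half-step layout 0,2,4,5,7,9,11
--     idx = (ord(s[0]) - ord("C")) % 7
--     pc = 2 * idx - (1 if idx >= 3 else 0)
--     i = 1
--     if s[1] == "#":
--         if s[0] in "EB":   # E# / B# are not names in this grammar
--             return None
--         pc += 1
--         i = 2
--     elif s[1] == "B":
--         if s[0] in "CF":   # Cb / Fb are not names in this grammar
--             return None
--         pc -= 1
--         i = 2
--     try:
--         return (int(s[i:]) + 1) * 12 + pc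
--     except ValueError:
--         return None
--
--
-- def parse_pattern(pattern: str) -> list:
--     return [_midi(t) for t in pattern.split()]
-- ===== Notes on version B (the rewrite author's own statement) =====
-- stated objective: alternative
-- what changed: B computes the pitch class arithmetically from the letter's code point (diatonic index modulo 7 mapped through the whole/half-step semitone layout, plus or minus one for an accidental, explicitly rejecting the four letter/accidental pairs absent from the table) instead of A's 17-entry name table with key slicing and dict lookup; the outer loop becomes a comprehension over split().
import Mathlib
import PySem

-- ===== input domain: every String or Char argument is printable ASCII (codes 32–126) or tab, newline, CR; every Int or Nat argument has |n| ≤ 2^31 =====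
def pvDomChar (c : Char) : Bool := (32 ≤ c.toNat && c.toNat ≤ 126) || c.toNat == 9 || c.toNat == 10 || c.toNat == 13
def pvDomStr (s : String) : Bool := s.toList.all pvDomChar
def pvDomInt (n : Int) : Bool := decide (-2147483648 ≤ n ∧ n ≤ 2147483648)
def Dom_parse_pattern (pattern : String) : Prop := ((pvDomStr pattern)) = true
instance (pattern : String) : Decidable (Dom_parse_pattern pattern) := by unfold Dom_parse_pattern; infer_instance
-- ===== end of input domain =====

-- B replaces A's 17-entry name table and key slicing by an arithmetic pitch-class computation
-- from the letter's code point; objective: alternative (same cost, no table).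

-- ===== PORT A =====
-- A's note-name table (local dict in _note_to_midi), keyed by the characters of the name.
def pvNamesA : PySem.Dict (List Char) Int :=
  PySem.Dict.ofList [(['C'], 0), (['C', '#'], 1), (['D', 'B'], 1), (['D'], 2), (['D', '#'], 3),
    (['E', 'B'], 3), (['E'], 4), (['F'], 5), (['F', '#'], 6), (['G', 'B'], 6), (['G'], 7),
    (['G', '#'], 8), (['A', 'B'], 8), (['A'], 9), (['A', '#'], 10), (['B', 'B'], 10), (['B'], 11)]

-- _note_to_midi after 's = str(note or "").strip().upper()' (the body from 'if not s:' on)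
def pvNoteBodyA (s : List Char) : Option Int :=
  if s.isEmpty then none
  else if s = ['~'] ∨ s = ['R', 'E', 'S', 'T'] ∨ s = ['R'] then none
  else if s.length < 2 then none
  else
    match s with
    | c0 :: c1 :: t =>
      -- letter = s[0]; accidental/rest from s[1:] when s[1] in ("#","B")
      let ar : List Char × List Char := if c1 = '#' ∨ c1 = 'B' then ([c1], t) else ([], c1 :: t)
      let key : List Char := c0 :: ar.1
      if pvNamesA.contains key = false then none
      else
        match PySem.Int.ofChars? ar.2 with
        | none => none                                   -- except: int(rest) raised
        | some octave => some ((octave + 1) * 12 + pvNamesA.getD key 0)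
    | _ => none                                          -- unreachable: s.length ≥ 2 here

def pvNoteToMidiA (note : List Char) : Option Int :=
  pvNoteBodyA (PySem.Chars.upper (PySem.Chars.strip note))

def parse_pattern (pattern : String) : List (Option Int) :=
  let s := PySem.Chars.strip pattern.toList
  if s.isEmpty then []
  else (PySem.Chars.split₀ s).foldl (fun out tok => out ++ [pvNoteToMidiA tok]) []

-- ===== PORT B =====
-- _midi's body after 's = tok.strip().upper()': arithmetic pitch class, no table
def pvMidiBodyB (s : List Char) : Option Int :=
  match s with
  | c0 :: c1 :: t =>
    if c0 = 'A' ∨ c0 = 'B' ∨ c0 = 'C' ∨ c0 = 'D' ∨ c0 = 'E' ∨ c0 = 'F' ∨ c0 = 'G' then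
      let idx : Int := PySem.Int.mod ((c0.toNat : Int) - 67) 7
      let pc : Int := 2 * idx - (if 3 ≤ idx then (1 : Int) else 0)
      if c1 = '#' then
        if c0 = 'E' ∨ c0 = 'B' then none
        else
          match PySem.Int.ofChars? t with
          | none => none                                 -- except ValueError: return None
          | some o => some ((o + 1) * 12 + (pc + 1))
      else if c1 = 'B' then
        if c0 = 'C' ∨ c0 = 'F' then none
        else
          match PySem.Int.ofChars? t with
          | none => none
          | some o => some ((o + 1) * 12 + (pc - 1))
      else
        match PySem.Int.ofChars? (c1 :: t) with
        | none => none
        | some o => some ((o + 1) * 12 + pc)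
    else none
  | _ => none                                            -- len(s) < 2

def pvMidiB (tok : List Char) : Option Int :=
  pvMidiBodyB (PySem.Chars.upper (PySem.Chars.strip tok))

def parse_pattern_alt (pattern : String) : List (Option Int) :=
  (PySem.Chars.split₀ pattern.toList).map pvMidiB

-- ===== PRECONDITION & SPEC =====
def Spec_parse_pattern (pattern : String) (out : List (Option Int)) : Prop := out = parse_pattern_alt pattern
instance (pattern : String) (out : List (Option Int)) : Decidable (Spec_parse_pattern pattern out) := by unfold Spec_parse_pattern; infer_instance

-- ===== CLAIM (what is proved, stated in full; the proofs are below) =====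
def Claim_equal_parse_pattern : Prop := ∀ (pattern : String), Dom_parse_pattern pattern → Spec_parse_pattern pattern (parse_pattern pattern)

-- ===== LEMMAS AND PROOFS =====

-- split() ignores an all-whitespace chunk at the front of the remaining input
theorem pv_go_space_left (t : List Char) (ht : ∀ c ∈ t, PySem.Chars.isspace c = true)
    (s : List Char) (acc : List (List Char)) :
    PySem.Chars.split₀.go (t ++ s) [] acc = PySem.Chars.split₀.go s [] acc := by
  induction t with
  | nil => rfl
  | cons c t ih =>
    have hc : PySem.Chars.isspace c = true := ht c (by simp)
    simp only [List.cons_append, PySem.Chars.split₀.go, hc, if_pos, List.isEmpty_nil]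
    exact ih (fun x hx => ht x (by simp [hx]))

-- split() ignores an all-whitespace tail
theorem pv_go_space_right (s t : List Char) (ht : ∀ c ∈ t, PySem.Chars.isspace c = true)
    (cur : List Char) (acc : List (List Char)) :
    PySem.Chars.split₀.go (s ++ t) cur acc = PySem.Chars.split₀.go s cur acc := by
  induction s generalizing cur acc with
  | nil =>
    simp only [List.nil_append]
    induction t generalizing cur acc with
    | nil => rfl
    | cons c t iht =>
      have hc : PySem.Chars.isspace c = true := ht c (by simp)
      have ht' : ∀ x ∈ t, PySem.Chars.isspace x = true := fun x hx => ht x (by simp [hx])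
      by_cases hcur : cur = []
      · subst hcur
        simp only [PySem.Chars.split₀.go, hc, List.isEmpty_nil, if_pos]
        exact iht ht' [] acc
      · simp only [PySem.Chars.split₀.go, hc, if_pos, List.isEmpty_iff, hcur, if_false]
        rw [iht ht' [] (cur.reverse :: acc)]
        rfl
  | cons c s ih =>
    by_cases hc : PySem.Chars.isspace c = true
    · by_cases hcur : cur = [] <;>
        simp [PySem.Chars.split₀.go, hc, hcur, ih]
    · simp only [Bool.not_eq_true] at hc
      simp [PySem.Chars.split₀.go, hc, ih]

theorem pv_split_strip (l : List Char) :
    PySem.Chars.split₀ (PySem.Chars.strip l) = PySem.Chars.split₀ l := by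
  unfold PySem.Chars.split₀ PySem.Chars.strip PySem.Chars.rstrip PySem.Chars.lstrip
  have h1 : ∀ (q : List Char) (acc : List (List Char)),
      PySem.Chars.split₀.go ((List.dropWhile PySem.Chars.isspace q.reverse).reverse) [] acc
        = PySem.Chars.split₀.go q [] acc := by
    intro q acc
    conv_rhs => rw [show q = (List.dropWhile PySem.Chars.isspace q.reverse).reverse
        ++ (List.takeWhile PySem.Chars.isspace q.reverse).reverse by
      rw [← List.reverse_append, List.takeWhile_append_dropWhile, List.reverse_reverse]]
    rw [pv_go_space_right _ _ (fun c hc => List.mem_takeWhile_imp (by simpa using hc))]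
  rw [h1]
  conv_rhs => rw [show l = List.takeWhile PySem.Chars.isspace l
      ++ List.dropWhile PySem.Chars.isspace l from (List.takeWhile_append_dropWhile).symm]
  rw [pv_go_space_left _ (fun c hc => List.mem_takeWhile_imp hc)]

-- first char of any key of A's table is a note letter
theorem pv_nonletter (c0 : Char) (k : List Char)
    (hL : ¬(c0 = 'A' ∨ c0 = 'B' ∨ c0 = 'C' ∨ c0 = 'D' ∨ c0 = 'E' ∨ c0 = 'F' ∨ c0 = 'G')) :
    pvNamesA.contains (c0 :: k) = false := by
  rw [Bool.eq_false_iff]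
  intro hcon
  rw [PySem.Dict.contains_iff_mem_keys] at hcon
  rw [show pvNamesA.keys = [['C'], ['C', '#'], ['D', 'B'], ['D'], ['D', '#'], ['E', 'B'], ['E'],
      ['F'], ['F', '#'], ['G', 'B'], ['G'], ['G', '#'], ['A', 'B'], ['A'], ['A', '#'],
      ['B', 'B'], ['B']] from by decide] at hcon
  simp only [List.mem_cons, List.cons.injEq, List.not_mem_nil, or_false] at hcon
  tauto

-- the per-token cores agree on every (already stripped-and-uppercased) token
theorem pv_body_eq (s : List Char) : pvNoteBodyA s = pvMidiBodyB s := by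
  match s with
  | [] => rfl
  | [c0] =>
    simp only [pvNoteBodyA, pvMidiBodyB]
    split_ifs <;> rfl
  | c0 :: c1 :: t =>
    by_cases hL : c0 = 'A' ∨ c0 = 'B' ∨ c0 = 'C' ∨ c0 = 'D' ∨ c0 = 'E' ∨ c0 = 'F' ∨ c0 = 'G'
    · rcases hL with h | h | h | h | h | h | h <;> subst h <;>
      · by_cases hs : c1 = '#'
        · subst hs
          cases hoc : PySem.Int.ofChars? t <;>
            simp [pvNoteBodyA, pvMidiBodyB, hoc] <;> decide
        · by_cases hb : c1 = 'B'
          · subst hb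
            cases hoc : PySem.Int.ofChars? t <;>
              simp [pvNoteBodyA, pvMidiBodyB, hoc] <;> decide
          · cases hoc : PySem.Int.ofChars? (c1 :: t) <;>
              simp [pvNoteBodyA, pvMidiBodyB, hoc, hs, hb] <;> decide
    · simp only [pvNoteBodyA, pvMidiBodyB]
      rw [if_neg hL]
      split_ifs <;> first
        | rfl
        | (rename_i hcc; exact absurd (pv_nonletter c0 _ hL) hcc)

theorem pv_tok_eq (tok : List Char) : pvNoteToMidiA tok = pvMidiB tok := by
  unfold pvNoteToMidiA pvMidiB
  exact pv_body_eq _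

-- ===== VERDICT (by name: the statement is the Claim_ definition above) =====
theorem parse_pattern_spec : Claim_equal_parse_pattern := by
  intro pattern _
  unfold Spec_parse_pattern parse_pattern parse_pattern_alt
  rw [← pv_split_strip pattern.toList]
  by_cases h : (PySem.Chars.strip pattern.toList).isEmpty
  · rw [if_pos h]
    rw [List.isEmpty_iff] at h
    rw [h]
    rfl
  · rw [if_neg h, PySem.List.foldl_append_singleton_eq_map]
    exact List.map_congr_left (fun tok _ => pv_tok_eq tok)
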